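-- pv_equiv track=rewrite | github.com/dorukardahan/ZeroAPI | integrations/hermes/vision_aux.py | _extract_main_runtime
-- ===== SOURCE A (Python) =====
-- def _extract_main_runtime(config_text: str) -> tuple[str | None, str | None]:
--     """Extract ``model.provider`` and ``model.default`` from simple YAML.
--
--     This intentionally avoids adding a PyYAML dependency to the adapter tests.
--     Hermes' generated config stores the active runtime in this plain shape:
--
--     model:
--       provider: zai
--       default: glm-5.1
--     """
--     in_model = False
--     provider: str | None = None
--     model: str | None = None
--     for raw_line in config_text.splitlines():
--         line = raw_line.rstrip()
--         if line == "model:":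
--             in_model = True
--             continue
--         if in_model and line and not line.startswith(" "):
--             break
--         if not in_model:
--             continue
--         stripped = line.strip()
--         if stripped.startswith("provider:"):
--             provider = stripped.split(":", 1)[1].strip().strip("'\"") or None
--         elif stripped.startswith("default:"):
--             model = stripped.split(":", 1)[1].strip().strip("'\"") or None
--     return provider, model
-- ===== SOURCE B (Python) =====
-- def _extract_main_runtime(config_text: str) -> tuple[str | None, str | None]:
--     """Two-pass parse: locate the 'model:' block, then read its keys."""
--     lines = [raw.rstrip() for raw in config_text.splitlines()]
--     try:
--         start = lines.index("model:")
--     except ValueError: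
--         return None, None
--     block = []
--     for line in lines[start + 1:]:
--         if line and not line.startswith(" "):
--             break
--         block.append(line)
--     provider = None
--     model = None
--     for line in block:
--         stripped = line.strip()
--         if stripped.startswith("provider:"):
--             provider = stripped.split(":", 1)[1].strip().strip("'\"") or None
--         elif stripped.startswith("default:"):
--             model = stripped.split(":", 1)[1].strip().strip("'\"") or None
--     return provider, model
-- ===== Notes on version B (the rewrite author's own statement) =====
-- stated objective: alternative
-- what changed: Replaces A's single stateful scan (in_model flag, break, parse-in-place) by two separate passes: first locate the model block's header line and collect its indented lines, then parse only the collected block; Pre_ excludes texts where the unindented model header line occurs more than once, a duplicate-key corner of invalid YAML on which A keeps scanning past the repeated header while B ends the block there, and either reading is defensible.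
-- outside the precondition, e.g. on _extract_main_runtime('model:\nmodel:\n provider: x'): A returns ('x', None), B returns (None, None)
import Mathlib
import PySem

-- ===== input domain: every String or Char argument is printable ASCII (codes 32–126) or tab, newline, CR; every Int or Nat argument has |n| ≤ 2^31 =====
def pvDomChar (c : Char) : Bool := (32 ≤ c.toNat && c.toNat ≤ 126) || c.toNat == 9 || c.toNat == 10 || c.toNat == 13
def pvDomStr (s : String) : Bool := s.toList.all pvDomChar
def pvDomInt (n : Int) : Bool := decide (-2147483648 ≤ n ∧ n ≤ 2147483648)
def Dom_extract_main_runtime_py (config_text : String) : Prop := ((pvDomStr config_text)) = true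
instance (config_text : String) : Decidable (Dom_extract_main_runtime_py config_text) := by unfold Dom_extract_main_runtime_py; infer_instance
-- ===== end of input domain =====

-- B replaces A's single stateful scan by two passes (locate/collect the 'model:' block, then parse it); objective: alternative decomposition.


-- shared value extraction: stripped.split(":", 1)[1].strip().strip("'\"") or None
-- (the '[1]' is only reached under a startswith "…:" guard, so the split always has a second part;
--  the getD default is never used there)
def pvVal (stripped : String) : Option String :=
  let parts := (PySem.Str.splitMax? stripped ":" 1).getD []
  let v := PySem.Str.stripChars (PySem.Str.strip (parts.getD 1 "")) "'\""
  if v == "" then none else some v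

-- ===== PORT A =====
-- A's single loop with state (in_model, provider, model); 'break' = returning the pair.
def pvALoop : List String → Bool → Option String → Option String → Option String × Option String
  | [], _, provider, model => (provider, model)
  | raw_line :: rest, in_model, provider, model =>
    let line := PySem.Str.rstrip raw_line
    if line == "model:" then pvALoop rest true provider model
    else if in_model && !(line == "") && !(PySem.Str.startswith line " ") then (provider, model)
    else if !in_model then pvALoop rest in_model provider model
    else
      let stripped := PySem.Str.strip line
      if PySem.Str.startswith stripped "provider:" then
        pvALoop rest in_model (pvVal stripped) model
      else if PySem.Str.startswith stripped "default:" then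
        pvALoop rest in_model provider (pvVal stripped)
      else
        pvALoop rest in_model provider model

def extract_main_runtime_py (config_text : String) : Option String × Option String :=
  pvALoop (PySem.Str.splitlines config_text) false none none

-- ===== PORT B =====
-- pass 1b: collect the block lines after the first 'model:' (stop at a dedented non-empty line)
def pvBCollect : List String → List String
  | [] => []
  | line :: rest =>
    if !(line == "") && !(PySem.Str.startswith line " ") then []
    else line :: pvBCollect rest

-- pass 2: parse the collected block, last occurrence wins
def pvBStep (pm : Option String × Option String) (line : String) : Option String × Option String :=
  let stripped := PySem.Str.strip line
  if PySem.Str.startswith stripped "provider:" then (pvVal stripped, pm.2)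
  else if PySem.Str.startswith stripped "default:" then (pm.1, pvVal stripped)
  else pm

def extract_main_runtime_py_alt (config_text : String) : Option String × Option String :=
  let lines := (PySem.Str.splitlines config_text).map PySem.Str.rstrip
  match PySem.List.index? lines "model:" with
  | none => (none, none)
  | some start =>
    let block := pvBCollect (PySem.List.slice lines (some ((start : Int) + 1)) none)
    block.foldl pvBStep (none, none)

-- ===== PRECONDITION & SPEC =====
-- Pre_ excludes texts whose rstrip'd lines contain the model header line more than once (A still
-- returns there): on such duplicate-key input A's flag keeps scanning past the repeated unindented
-- header while B treats it as the end of the block; duplicate top-level keys are invalid YAML and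
-- either reading is defensible.
def Pre_extract_main_runtime_py (config_text : String) : Prop :=
  ((PySem.Str.splitlines config_text).map PySem.Str.rstrip).count "model:" ≤ 1
instance (config_text : String) : Decidable (Pre_extract_main_runtime_py config_text) := by
  unfold Pre_extract_main_runtime_py; infer_instance

def pvWitness_extract_main_runtime_py : String := "model:\n provider: zai\n default: glm-5.1"

def Spec_extract_main_runtime_py (config_text : String) (out : Option String × Option String) : Prop := out = extract_main_runtime_py_alt config_text
instance (config_text : String) (out : Option String × Option String) : Decidable (Spec_extract_main_runtime_py config_text out) := by unfold Spec_extract_main_runtime_py; infer_instance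

-- ===== CLAIM (what is proved, stated in full; the proofs are below) =====
def Claim_equal_extract_main_runtime_py : Prop := ∀ (config_text : String), Dom_extract_main_runtime_py config_text → Pre_extract_main_runtime_py config_text → Spec_extract_main_runtime_py config_text (extract_main_runtime_py config_text)

-- ===== LEMMAS AND PROOFS =====

-- lines[k+1:] is drop (k+1)
theorem pvSliceSucc {a : Type} (l : List a) (k : Nat) :
    PySem.List.slice l (some ((k : Int) + 1)) none = l.drop (k + 1) := by
  rw [show ((k : Int) + 1) = ((k + 1 : Nat) : Int) by push_cast; ring,
      PySem.List.slice_from_natCast]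

-- Once in the block (in_model = true), and no further 'model:' line remains, A's remaining loop
-- equals folding pvBStep over the collected block lines.
theorem pvALoop_in (raws : List String) (h : "model:" ∉ raws.map PySem.Str.rstrip) :
    ∀ p m, pvALoop raws true p m = (pvBCollect (raws.map PySem.Str.rstrip)).foldl pvBStep (p, m) := by
  induction raws with
  | nil => intro p m; simp [pvALoop, pvBCollect]
  | cons raw rest ih =>
    intro p m
    simp only [List.map_cons, List.mem_cons, not_or] at h
    have h1 : (PySem.Str.rstrip raw == "model:") = false := by
      simp [show PySem.Str.rstrip raw ≠ "model:" from fun e => h.1 e.symm]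
    simp only [List.map_cons, pvALoop, pvBCollect, h1, Bool.false_eq_true, if_false, Bool.true_and]
    split_ifs <;> simp_all [pvBStep]

-- Before the block, A skips everything until the first 'model:' line; this matches B's
-- index?-then-slice, provided 'model:' occurs at most once overall.
theorem pvALoop_pre (raws : List String)
    (h : (raws.map PySem.Str.rstrip).count "model:" ≤ 1) :
    pvALoop raws false none none =
      (match PySem.List.index? (raws.map PySem.Str.rstrip) "model:" with
       | none => (none, none)
       | some start =>
         (pvBCollect (PySem.List.slice (raws.map PySem.Str.rstrip) (some ((start : Int) + 1)) none)).foldl pvBStep (none, none)) := by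
  induction raws with
  | nil => simp [pvALoop, PySem.List.index?]
  | cons raw rest ih =>
    simp only [List.map_cons, pvALoop, Bool.false_and, Bool.false_eq_true, if_false,
      Bool.not_false, if_true]
    by_cases h1 : PySem.Str.rstrip raw = "model:"
    · have hrest : "model:" ∉ rest.map PySem.Str.rstrip := by
        rw [← List.count_eq_zero]
        simp only [List.map_cons, List.count_cons, h1, beq_self_eq_true, if_true] at h
        omega
      rw [h1, PySem.List.index?_cons_self]
      simp only [beq_self_eq_true, if_true, Nat.cast_zero, zero_add]
      rw [show (1 : Int) = ((0 : Nat) : Int) + 1 by norm_num, pvSliceSucc]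
      simpa using pvALoop_in rest hrest none none
    · have h1b : (PySem.Str.rstrip raw == "model:") = false := by simp [h1]
      have hrest : (rest.map PySem.Str.rstrip).count "model:" ≤ 1 := by
        simp only [List.map_cons, List.count_cons, h1b] at h
        omega
      rw [PySem.List.index?_cons_of_ne _ h1]
      simp only [h1b, Bool.false_eq_true, if_false]
      rw [ih hrest]
      cases hidx : PySem.List.index? (rest.map PySem.Str.rstrip) "model:" with
      | none => simp
      | some k =>
        simp only [Option.map_some]
        rw [pvSliceSucc, pvSliceSucc]
        simp [List.drop_succ_cons]

-- ===== VERDICT (by name: the statement is the Claim_ definition above) =====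
theorem extract_main_runtime_py_spec : Claim_equal_extract_main_runtime_py := by
  intro config_text _ hpre
  unfold Spec_extract_main_runtime_py extract_main_runtime_py extract_main_runtime_py_alt
  exact pvALoop_pre (PySem.Str.splitlines config_text) hpre
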